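-- pv_equiv track=rewrite | github.com/richardbiro/bakalarska_praca | kod/magickeUtvary.py | asponSedemStvorcov
-- ===== SOURCE A (Python) =====
-- from math import gcd, inf, isqrt
--
-- def jeDruhouMocninou(n):
--         if n < 0:
--                 return False
--         return isqrt(n) * isqrt(n) == n
--
-- def rozne(P):
--         return len(P) == len(set(P))
--
-- def asponSedemStvorcov(stvorec):
--         if rozne(stvorec[0] + stvorec[1] + stvorec[2]):
--                 pocetStvorcov = 0
--                 for riadok in stvorec:
--                      for prvok in riadok:
--                              if jeDruhouMocninou(prvok):
--                                      pocetStvorcov += 1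
--                 if pocetStvorcov >= 7:
--                         return True
--                 return False
--         return False
-- ===== SOURCE B (Python) =====
-- def koren(n):
--     lo, hi = 0, n
--     while lo < hi:
--         mid = (lo + hi + 1) // 2
--         if mid * mid <= n:
--             lo = mid
--         else:
--             hi = mid - 1
--     return lo
--
-- def asponSedemStvorcov(stvorec):
--     head = sorted(stvorec[0] + stvorec[1] + stvorec[2])
--     if any(x == y for x, y in zip(head, head[1:])):
--         return False
--     pocet = 0
--     for riadok in stvorec:
--         for prvok in riadok:
--             if prvok >= 0:
--                 k = koren(prvok)
--                 if k * k == prvok: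
--                     pocet += 1
--     return pocet >= 7
-- ===== Notes on version B (the rewrite author's own statement) =====
-- stated objective: alternative
-- what changed: A tests distinctness by comparing len(P) with len(set(P)) and counts squares via math.isqrt; B sorts the nine cells and rejects on any equal adjacent pair (sort-then-scan, no hash set), and tests squareness with a hand-written binary search for the integer square root instead of isqrt.
import Mathlib
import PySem

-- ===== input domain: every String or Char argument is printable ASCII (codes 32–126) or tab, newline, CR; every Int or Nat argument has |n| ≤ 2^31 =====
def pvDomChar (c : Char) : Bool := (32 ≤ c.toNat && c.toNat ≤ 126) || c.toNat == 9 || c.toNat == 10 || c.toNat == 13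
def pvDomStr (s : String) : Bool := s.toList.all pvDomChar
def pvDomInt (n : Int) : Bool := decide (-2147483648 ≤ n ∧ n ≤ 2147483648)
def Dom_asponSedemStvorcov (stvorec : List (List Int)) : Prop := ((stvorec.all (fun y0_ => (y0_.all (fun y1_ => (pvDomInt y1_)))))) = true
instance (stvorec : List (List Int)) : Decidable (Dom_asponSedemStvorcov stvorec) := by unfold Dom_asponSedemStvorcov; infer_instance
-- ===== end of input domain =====

-- B replaces A's len/set cardinality test by sort-then-adjacent-scan distinctness and A's
-- math.isqrt square test by a hand-written binary search for the integer root (objective: alternative).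


-- ===== PORT A =====
def jeDruhouMocninou (n : Int) : Bool :=
  if n < 0 then false
  else ((Nat.sqrt n.toNat : Int) * (Nat.sqrt n.toNat : Int) == n)

def rozne (P : List Int) : Bool :=
  PySem.List.len P == PySem.List.len (PySem.Set.ofList P)

def asponSedemStvorcov (stvorec : List (List Int)) : Bool :=
  -- stvorec[0..2]: under Pre_ these indices are in range (A raises IndexError otherwise)
  let r0 := PySem.List.pyGetD stvorec 0 []
  let r1 := PySem.List.pyGetD stvorec 1 []
  let r2 := PySem.List.pyGetD stvorec 2 []
  if rozne (r0 ++ r1 ++ r2) then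
    let pocetStvorcov : Int :=
      stvorec.foldl (fun acc riadok =>
        riadok.foldl (fun a prvok => if jeDruhouMocninou prvok then a + 1 else a) acc) 0
    if pocetStvorcov ≥ 7 then true else false
  else false

-- ===== PORT B =====
-- koren's while-loop: fuel-guarded structural recursion; the fuel bounds the shrinking bracket hi - lo,
-- so with fuel = n.toNat the loop always runs to lo = hi (proved in korenAux_eq)
def korenAux (n : Int) : Nat → Int → Int → Int
  | 0, lo, _ => lo
  | fuel + 1, lo, hi =>
    if lo < hi then
      let mid := PySem.Int.floordiv (lo + hi + 1) 2
      if mid * mid ≤ n then korenAux n fuel mid hi else korenAux n fuel lo (mid - 1)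
    else lo

def koren (n : Int) : Int := korenAux n n.toNat 0 n

def asponSedemStvorcov_alt (stvorec : List (List Int)) : Bool :=
  -- stvorec[0..2]: under Pre_ these indices are in range (B raises IndexError otherwise)
  let head := PySem.List.sorted (PySem.List.pyGetD stvorec 0 [] ++ PySem.List.pyGetD stvorec 1 []
      ++ PySem.List.pyGetD stvorec 2 []) (fun x => x) false
  -- any(x == y for x, y in zip(head, head[1:]));  head[1:] is head.tail (exact)
  if (head.zip head.tail).any (fun p => p.1 == p.2) then false
  else
    let pocet : Int :=
      stvorec.foldl (fun acc riadok =>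
        riadok.foldl (fun a prvok =>
          if 0 ≤ prvok then
            let k := koren prvok
            if k * k == prvok then a + 1 else a
          else a) acc) 0
    decide (7 ≤ pocet)

-- ===== PRECONDITION & SPEC =====
-- Pre_ excludes grids with fewer than three rows: there A (at stvorec[2]) and B (at its flatten) raise IndexError.
def Pre_asponSedemStvorcov (stvorec : List (List Int)) : Prop := 3 ≤ stvorec.length
instance (stvorec : List (List Int)) : Decidable (Pre_asponSedemStvorcov stvorec) := by unfold Pre_asponSedemStvorcov; infer_instance
def pvWitness_asponSedemStvorcov : List (List Int) := [[1, 2, 3], [4, 5, 6], [7, 8, 9]]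

def Spec_asponSedemStvorcov (stvorec : List (List Int)) (out : Bool) : Prop := out = asponSedemStvorcov_alt stvorec
instance (stvorec : List (List Int)) (out : Bool) : Decidable (Spec_asponSedemStvorcov stvorec out) := by unfold Spec_asponSedemStvorcov; infer_instance

-- ===== CLAIM (what is proved, stated in full; the proofs are below) =====
def Claim_equal_asponSedemStvorcov : Prop := ∀ (stvorec : List (List Int)), Dom_asponSedemStvorcov stvorec → Pre_asponSedemStvorcov stvorec → Spec_asponSedemStvorcov stvorec (asponSedemStvorcov stvorec)

-- ===== LEMMAS AND PROOFS =====

-- the binary search converges to the integer square root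
theorem korenAux_eq (k : Nat) (n lo hi : Int) (hk : (hi - lo).toNat ≤ k) (hlo : 0 ≤ lo)
    (h1 : lo ≤ (Nat.sqrt n.toNat : Int))
    (h2 : (Nat.sqrt n.toNat : Int) ≤ hi) (hn : 0 ≤ n) :
    korenAux n k lo hi = (Nat.sqrt n.toNat : Int) := by
  induction k generalizing lo hi with
  | zero =>
    simp only [korenAux]
    omega
  | succ k ih =>
    simp only [korenAux]
    by_cases h : lo < hi
    · simp only [h, if_true]
      rw [PySem.Int.floordiv_eq_ediv_of_pos (by omega : (0:Int) < 2)]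
      set mid := (lo + hi + 1) / 2 with hmid
      have hmb : lo < mid ∧ mid ≤ hi := by omega
      have hsq : mid * mid ≤ n ↔ mid ≤ (Nat.sqrt n.toNat : Int) := by
        have h0 : 0 ≤ mid := by omega
        constructor
        · intro hle
          have : mid.toNat * mid.toNat ≤ n.toNat := by
            zify [Int.toNat_of_nonneg h0, Int.toNat_of_nonneg hn]; exact hle
          have := Nat.le_sqrt.mpr this
          omega
        · intro hle
          have hs : (Nat.sqrt n.toNat : Int) * (Nat.sqrt n.toNat : Int) ≤ n := by
            have := Nat.sqrt_le' n.toNat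
            zify [pow_two] at this
            omega
          calc mid * mid ≤ (Nat.sqrt n.toNat : Int) * (Nat.sqrt n.toNat : Int) :=
                mul_le_mul hle hle h0 (by positivity)
            _ ≤ n := hs
      by_cases hc : mid * mid ≤ n
      · simp only [hc, if_true]
        exact ih mid hi (by omega) (by omega) (hsq.mp hc) h2
      · simp only [hc, if_false]
        have : ¬ mid ≤ (Nat.sqrt n.toNat : Int) := fun hx => hc (hsq.mpr hx)
        exact ih lo (mid - 1) (by omega) hlo h1 (by omega)
    · simp only [h, if_false]
      omega

theorem koren_eq (n : Int) (hn : 0 ≤ n) : koren n = (Nat.sqrt n.toNat : Int) := by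
  have hs : (Nat.sqrt n.toNat : Int) ≤ n := by
    have := Nat.sqrt_le_self n.toNat
    omega
  exact korenAux_eq n.toNat n 0 n (by omega) le_rfl (by positivity) hs hn

-- B's guarded bisection test agrees with A's helper jeDruhouMocninou, so the counting loops agree
theorem pvCount_eq (rows : List (List Int)) (a : Int) :
    rows.foldl (fun acc riadok =>
        riadok.foldl (fun x prvok =>
          if 0 ≤ prvok then
            let k := koren prvok
            if k * k == prvok then x + 1 else x
          else x) acc) a
    = rows.foldl (fun acc riadok =>
        riadok.foldl (fun x prvok => if jeDruhouMocninou prvok then x + 1 else x) acc) a := by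
  have hb : (fun (x prvok : Int) =>
        if 0 ≤ prvok then
          let k := koren prvok
          if k * k == prvok then x + 1 else x
        else x)
      = (fun (x prvok : Int) => if jeDruhouMocninou prvok then x + 1 else x) := by
    funext x p
    by_cases hp : 0 ≤ p
    · simp only [hp, if_true, koren_eq p hp, jeDruhouMocninou, not_lt.mpr hp, if_false]
    · have hneg : p < 0 := by omega
      simp [hp, jeDruhouMocninou, hneg]
  simp only [hb]

theorem rozne_append_singleton (acc : List Int) (v : Int) :
    rozne (acc ++ [v]) = (rozne acc && !decide (v ∈ acc)) := by
  unfold rozne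
  rw [PySem.Set.ofList_append_singleton, PySem.Set.add_eq_ite]
  have hle := PySem.Set.length_ofList_le (xs := acc)
  by_cases h : v ∈ acc
  · have h' : v ∈ PySem.Set.ofList acc := (PySem.Set.mem_ofList _ _).mpr h
    simp [h', h, PySem.List.len_eq]
    omega
  · have h' : v ∉ PySem.Set.ofList acc := fun hx => h ((PySem.Set.mem_ofList _ _).mp hx)
    simp [h', h, PySem.List.len_eq]

theorem rozne_eq_nodup (P : List Int) : rozne P = decide P.Nodup := by
  induction P using List.reverseRecOn with
  | nil => rfl
  | append_singleton acc v ih =>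
    rw [rozne_append_singleton, ih]
    by_cases h1 : acc.Nodup <;> by_cases h2 : v ∈ acc <;>
      simp [List.nodup_append, h1, h2]
    exact fun a ha hav => h2 (hav ▸ ha)

theorem zipAny (l : List Int) :
    ((l.zip l.tail).any fun p => p.1 == p.2) = decide (¬ l.IsChain (· ≠ ·)) := by
  induction l with
  | nil => simp
  | cons x t ih =>
    cases t with
    | nil => simp
    | cons y t =>
      simp only [List.tail_cons, List.zip_cons_cons, List.any_cons,
        List.isChain_cons_cons]
      rw [show ((y :: t).zip t) = ((y :: t).zip (y :: t).tail) from rfl, ih]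
      by_cases hxy : x = y <;> by_cases hc : List.IsChain (· ≠ ·) (y :: t) <;>
        simp [hxy, hc]

theorem chain_ne_iff_nodup (l : List Int) (hp : l.Pairwise (· ≤ ·)) :
    l.IsChain (· ≠ ·) ↔ l.Nodup := by
  constructor
  · intro hc
    have hle : l.IsChain (· ≤ ·) := List.isChain_iff_pairwise.mpr hp
    have hlt : l.IsChain (· < ·) := by
      rw [List.isChain_iff_getElem] at hc hle ⊢
      intro i h
      exact lt_of_le_of_ne (hle i h) (hc i h)
    exact (List.isChain_iff_pairwise.mp hlt).imp (@fun a b h => ne_of_lt h)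
  · intro hn
    have hlt : l.Pairwise (· < ·) := by
      refine (hn.and hp).imp ?_
      exact fun ⟨h1, h2⟩ => lt_of_le_of_ne h2 h1
    exact (List.isChain_iff_pairwise.mpr hlt).imp (@fun a b h => ne_of_lt h)

theorem pvAdj_eq (P : List Int) :
    ((PySem.List.sorted P (fun x => x) false).zip
      (PySem.List.sorted P (fun x => x) false).tail).any (fun p => p.1 == p.2)
    = !decide P.Nodup := by
  rw [zipAny]
  have hp : (PySem.List.sorted P (fun x => x) false).Pairwise (· ≤ ·) :=
    PySem.List.sorted_pairwise (xs := P) (key := fun x => x)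
  have hperm := PySem.List.sorted_perm (xs := P) (key := fun x => x) (rev := false)
  rw [show (decide (¬ (PySem.List.sorted P (fun x => x) false).IsChain (· ≠ ·)))
      = !decide ((PySem.List.sorted P (fun x => x) false).IsChain (· ≠ ·)) by
    by_cases h : (PySem.List.sorted P (fun x => x) false).IsChain (· ≠ ·) <;> simp [h]]
  congr 1
  rw [Bool.decide_congr ((chain_ne_iff_nodup _ hp).trans hperm.nodup_iff)]

theorem asponSedemStvorcov_eq_alt (stvorec : List (List Int)) :
    asponSedemStvorcov stvorec = asponSedemStvorcov_alt stvorec := by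
  simp only [asponSedemStvorcov, asponSedemStvorcov_alt]
  rw [pvAdj_eq, rozne_eq_nodup, pvCount_eq]
  by_cases h : (PySem.List.pyGetD stvorec 0 [] ++ PySem.List.pyGetD stvorec 1 []
      ++ PySem.List.pyGetD stvorec 2 []).Nodup
  · simp only [h, decide_true, Bool.not_true, Bool.false_eq_true, if_false, if_true]
    split
    · rename_i hc
      rw [ge_iff_le] at hc
      exact (decide_eq_true hc).symm
    · rename_i hc
      rw [ge_iff_le, not_le] at hc
      exact (decide_eq_false (not_le.mpr hc)).symm
  · simp [h]

-- ===== VERDICT (by name: the statement is the Claim_ definition above) =====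
theorem asponSedemStvorcov_spec : Claim_equal_asponSedemStvorcov := by
  intro stvorec _ _
  exact asponSedemStvorcov_eq_alt stvorec
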